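-- pv_equiv track=rewrite | github.com/HeeJu-XiJu/Algorithm | programmers/level1/모의고사/sol.py | solution
-- ===== SOURCE A (Python) =====
-- def solution(answers):
--     list1 = [1, 2, 3, 4, 5]
--     list2 = [2, 1, 2, 3, 2, 4, 2, 5]
--     list3 = [3, 3, 1, 1, 2, 2, 4, 4, 5, 5]
--     answer1 = 0
--     answer2 = 0
--     answer3 = 0
--     for i in range(len(answers)):
--         if list1[i % len(list1)] == answers[i]:
--             answer1 += 1
--         if list2[i % len(list2)] == answers[i]:
--             answer2 += 1
--         if list3[i % len(list3)] == answers[i]: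
--             answer3 += 1
--
--     answer = []
--     if answer1 == max(answer1, answer2, answer3):
--         answer.append(1)
--     if answer2 == max(answer1, answer2, answer3):
--         answer.append(2)
--     if answer3 == max(answer1, answer2, answer3):
--         answer.append(3)
--     return answer
-- ===== SOURCE B (Python) =====
-- def solution(answers):
--     # All three patterns repeat with period lcm(5, 8, 10) = 40, so a single
--     # histogram of (position mod 40, answer) pairs determines every score:
--     # pattern p scores sum of the histogram entries at (r, p[r % len(p)]).
--     PERIOD = 40
--     cnt = {}
--     for i, a in enumerate(answers):
--         key = (i % PERIOD, a)
--         cnt[key] = cnt.get(key, 0) + 1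
--     patterns = [[1, 2, 3, 4, 5],
--                 [2, 1, 2, 3, 2, 4, 2, 5],
--                 [3, 3, 1, 1, 2, 2, 4, 4, 5, 5]]
--     scores = [sum(cnt.get((r, p[r % len(p)]), 0) for r in range(PERIOD))
--               for p in patterns]
--     best = max(scores)
--     return [i + 1 for i, s in enumerate(scores) if s == best]
-- ===== Notes on version B (the rewrite author's own statement) =====
-- stated objective: alternative
-- what changed: Instead of comparing every answer against each pattern, B builds one histogram keyed by (index mod 40, answer) in a single pass (40 = lcm of the pattern periods) and then reads each pattern's score off the table with 40 lookups, scanning answers only once and never comparing an answer to a pattern value.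
import Mathlib
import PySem

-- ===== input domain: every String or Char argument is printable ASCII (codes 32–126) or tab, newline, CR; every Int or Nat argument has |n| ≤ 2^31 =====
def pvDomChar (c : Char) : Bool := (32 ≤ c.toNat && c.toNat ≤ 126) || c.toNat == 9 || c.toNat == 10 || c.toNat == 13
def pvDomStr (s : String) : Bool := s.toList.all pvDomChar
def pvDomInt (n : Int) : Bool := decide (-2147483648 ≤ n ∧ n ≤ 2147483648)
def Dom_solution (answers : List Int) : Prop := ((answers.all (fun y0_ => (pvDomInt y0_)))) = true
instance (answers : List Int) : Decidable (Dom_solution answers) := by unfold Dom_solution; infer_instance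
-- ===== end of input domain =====

-- B replaces A's per-element comparisons against the three patterns by a single
-- histogram of (index mod 40, answer) pairs (40 = lcm of the pattern periods);
-- each pattern's score is then read off the table with 40 lookups. Objective: alternative.


-- ===== PORT A =====
def solution (answers : List Int) : List Int :=
  let list1 : List Int := [1, 2, 3, 4, 5]
  let list2 : List Int := [2, 1, 2, 3, 2, 4, 2, 5]
  let list3 : List Int := [3, 3, 1, 1, 2, 2, 4, 4, 5, 5]
  -- the for-loop over range(len(answers)) maintaining the three counters
  let s :=
    (PySem.List.pyRange 0 (answers.length : Int) 1).foldl
      (fun (acc : Int × Int × Int) i =>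
        ( if PySem.List.pyGetD list1 (PySem.Int.mod i (list1.length : Int)) 0
              == PySem.List.pyGetD answers i 0 then acc.1 + 1 else acc.1,
          if PySem.List.pyGetD list2 (PySem.Int.mod i (list2.length : Int)) 0
              == PySem.List.pyGetD answers i 0 then acc.2.1 + 1 else acc.2.1,
          if PySem.List.pyGetD list3 (PySem.Int.mod i (list3.length : Int)) 0
              == PySem.List.pyGetD answers i 0 then acc.2.2 + 1 else acc.2.2))
      ((0 : Int), (0 : Int), (0 : Int))
  let answer1 := s.1
  let answer2 := s.2.1
  let answer3 := s.2.2
  let m := max answer1 (max answer2 answer3)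
  let answer : List Int := []
  let answer := if answer1 = m then answer ++ [1] else answer
  let answer := if answer2 = m then answer ++ [2] else answer
  let answer := if answer3 = m then answer ++ [3] else answer
  answer

-- ===== PORT B =====
def solution_alt (answers : List Int) : List Int :=
  -- the histogram-building loop: for i, a in enumerate(answers): cnt[(i % 40, a)] += 1
  let cnt : PySem.Dict (Int × Int) Int :=
    (PySem.List.enumerate answers 0).foldl
      (fun d ia =>
        d.insert (PySem.Int.mod ia.1 40, ia.2) (d.getD (PySem.Int.mod ia.1 40, ia.2) 0 + 1))
      PySem.Dict.empty
  let patterns : List (List Int) :=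
    [[1, 2, 3, 4, 5], [2, 1, 2, 3, 2, 4, 2, 5], [3, 3, 1, 1, 2, 2, 4, 4, 5, 5]]
  -- scores = [sum(cnt.get((r, p[r % len(p)]), 0) for r in range(40)) for p in patterns]
  let scores := patterns.map (fun p =>
    ((PySem.List.pyRange 0 40 1).map
      (fun r => cnt.getD (r, PySem.List.pyGetD p (PySem.Int.mod r (p.length : Int)) 0) 0)).sum)
  let best := (PySem.List.max? scores (fun x => x)).getD 0
  ((PySem.List.enumerate scores 0).filter (fun q => q.2 == best)).map (fun q => q.1 + 1)

-- ===== PRECONDITION & SPEC =====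
def Spec_solution (answers : List Int) (out : List Int) : Prop := out = solution_alt answers
instance (answers : List Int) (out : List Int) : Decidable (Spec_solution answers out) := by unfold Spec_solution; infer_instance

-- ===== CLAIM (what is proved, stated in full; the proofs are below) =====
def Claim_equal_solution : Prop := ∀ (answers : List Int), Dom_solution answers → Spec_solution answers (solution answers)

-- ===== LEMMAS AND PROOFS =====

-- an (index, value) pair listed by enumerate reads back the value via Python indexing
theorem pv_enum_getD : ∀ (xs pref : List Int) (q : Int × Int),
    q ∈ PySem.List.enumerate xs (pref.length : Int) →
    PySem.List.pyGetD (pref ++ xs) q.1 0 = q.2 := by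
  intro xs
  induction xs with
  | nil => intro pref q h; simp [PySem.List.enumerate] at h
  | cons y ys ih =>
    intro pref q h
    rw [PySem.List.enumerate_cons] at h
    rcases List.mem_cons.mp h with h | h
    · subst h
      rw [PySem.List.pyGetD_of_nonneg _ _ (by positivity)]
      simp
    · have h' : q ∈ PySem.List.enumerate ys ((pref ++ [y]).length : Int) := by
        simpa [List.length_append, add_comm] using h
      have := ih (pref ++ [y]) q h'
      simpa using this

-- summing an indicator over a nodup list containing s picks out the term at s
theorem pv_sum_indicator (f : Int → Int) (a s : Int) :
    ∀ (l : List Int), l.Nodup → s ∈ l →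
    ((l.map (fun r => if ((r, f r) : Int × Int) = (s, a) then (1 : Int) else 0)).sum)
      = if a = f s then 1 else 0 := by
  intro l
  induction l with
  | nil => intro _ h; simp at h
  | cons x t ih =>
    intro hnd hs
    rcases List.mem_cons.mp hs with rfl | hs
    · have hx : s ∉ t := (List.nodup_cons.mp hnd).1
      have hz : (t.map (fun r => if ((r, f r) : Int × Int) = (s, a) then (1 : Int) else 0)).sum = 0 := by
        apply List.sum_eq_zero
        intro y hy
        rcases List.mem_map.mp hy with ⟨r, hr, rfl⟩
        have hne : r ≠ s := fun h => hx (h ▸ hr)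
        simp [Prod.ext_iff, hne]
      rw [List.map_cons, List.sum_cons, hz, add_zero]
      by_cases hfa : a = f s
      · simp [hfa]
      · have : f s ≠ a := fun h => hfa h.symm
        simp [Prod.ext_iff, hfa, this]
    · have hx : x ∉ t := (List.nodup_cons.mp hnd).1
      have hxs : x ≠ s := fun h => hx (h ▸ hs)
      have ht := ih (List.nodup_cons.mp hnd).2 hs
      rw [List.map_cons, List.sum_cons]
      have hz : (if ((x, f x) : Int × Int) = (s, a) then (1 : Int) else 0) = 0 := by
        simp [Prod.ext_iff, hxs]
      rw [hz, zero_add, ht]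

-- 40 histogram reads reproduce the direct match count, for keys within range(40)
theorem pv_sum_count (f : Int → Int) :
    ∀ (kl : List (Int × Int)),
    (∀ q ∈ kl, q.1 ∈ PySem.List.pyRange 0 40 1) →
    ((PySem.List.pyRange 0 40 1).map (fun r => ((kl.count (r, f r) : Int)))).sum
      = ((kl.countP (fun q => q.2 == f q.1) : Int)) := by
  intro kl
  induction kl with
  | nil => intro _; simp
  | cons q t ih =>
    intro h
    obtain ⟨qs, qa⟩ := q
    have ht := ih (fun p hp => h p (List.mem_cons_of_mem _ hp))
    have hq := h (qs, qa) List.mem_cons_self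
    have hsplit :
        ((PySem.List.pyRange 0 40 1).map (fun r => ((((qs, qa) :: t).count (r, f r) : Int)))).sum
        = ((PySem.List.pyRange 0 40 1).map (fun r => ((t.count (r, f r) : Int)))).sum
          + ((PySem.List.pyRange 0 40 1).map
              (fun r => if ((r, f r) : Int × Int) = (qs, qa) then (1 : Int) else 0)).sum := by
      rw [← List.sum_map_add]
      apply congrArg
      apply List.map_congr_left
      intro r _
      by_cases hc : ((r, f r) : Int × Int) = (qs, qa)
      · simp [hc]
      · simp [List.count_cons, hc]
        intro h1 h2
        exact hc (by simp [h1, h2])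
    rw [hsplit, ht,
        pv_sum_indicator f qa qs _ (PySem.List.nodup_pyRange_one 0 40) (by simpa using hq),
        List.countP_cons]
    by_cases hc : qa = f qs <;> simp [hc]

-- mod 40 then mod L collapses when L divides 40
theorem pv_mod_mod (i L : Int) (hL : 0 < L) (hd : L ∣ 40) :
    PySem.Int.mod (PySem.Int.mod i 40) L = PySem.Int.mod i L := by
  rw [PySem.Int.mod_eq_emod_of_pos (by norm_num : (0:Int) < 40),
      PySem.Int.mod_eq_emod_of_pos hL, PySem.Int.mod_eq_emod_of_pos hL]
  exact Int.emod_emod_of_dvd i hd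

-- each pattern's histogram score equals its direct match count over answers
theorem pv_score_eq (answers : List Int) (p : List Int) (hL : 0 < (p.length : Int))
    (hd : (p.length : Int) ∣ 40) :
    ((PySem.List.pyRange 0 40 1).map
      (fun r => (PySem.Dict.counter
          ((PySem.List.enumerate answers 0).map
            (fun ia => ((PySem.Int.mod ia.1 40, ia.2) : Int × Int)))).getD
        (r, PySem.List.pyGetD p (PySem.Int.mod r (p.length : Int)) 0) 0)).sum
    = (((PySem.List.enumerate answers 0).countP
        (fun ia => PySem.List.pyGetD p (PySem.Int.mod ia.1 (p.length : Int)) 0 == ia.2) : Int)) := by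
  have hkeys : ∀ q ∈ (PySem.List.enumerate answers 0).map
      (fun ia => ((PySem.Int.mod ia.1 40, ia.2) : Int × Int)),
      q.1 ∈ PySem.List.pyRange 0 40 1 := by
    intro q hq
    rcases List.mem_map.mp hq with ⟨ia, _, rfl⟩
    rw [PySem.List.mem_pyRange_one]
    exact ⟨PySem.Int.mod_nonneg _ (by norm_num), PySem.Int.mod_lt _ (by norm_num)⟩
  have h1 : ∀ r : Int, (PySem.Dict.counter
        ((PySem.List.enumerate answers 0).map
          (fun ia => ((PySem.Int.mod ia.1 40, ia.2) : Int × Int)))).getD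
        (r, PySem.List.pyGetD p (PySem.Int.mod r (p.length : Int)) 0) 0
      = (((PySem.List.enumerate answers 0).map
          (fun ia => ((PySem.Int.mod ia.1 40, ia.2) : Int × Int))).count
          (r, PySem.List.pyGetD p (PySem.Int.mod r (p.length : Int)) 0) : Int) := by
    intro r
    exact PySem.Dict.getD_counter _ _
  simp only [h1]
  rw [pv_sum_count (fun r => PySem.List.pyGetD p (PySem.Int.mod r (p.length : Int)) 0) _ hkeys]
  rw [List.countP_map]
  congr 1
  apply List.countP_congr
  intro ia _
  simp only [Function.comp]
  rw [pv_mod_mod ia.1 _ hL hd]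
  simp only [beq_iff_eq]
  exact eq_comm

set_option maxRecDepth 10000 in
theorem pv_max3 (a b c : Int) : (PySem.List.max? [a, b, c] (fun x => x)).getD 0 = max a (max b c) := by
  simp only [PySem.List.max?, List.foldl, max_def]
  repeat' split_ifs <;> simp_all <;> try omega

theorem pv_final (a b c : Int) :
    (if c = max a (max b c) then (if b = max a (max b c) then (if a = max a (max b c) then ([]:List Int)++[1] else []) ++ [2] else (if a = max a (max b c) then ([]:List Int)++[1] else [])) ++ [3]
     else (if b = max a (max b c) then (if a = max a (max b c) then ([]:List Int)++[1] else []) ++ [2] else (if a = max a (max b c) then ([]:List Int)++[1] else []))) =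
    ((PySem.List.enumerate [a, b, c] 0).filter (fun p => p.2 == (PySem.List.max? [a, b, c] (fun x => x)).getD 0)).map (fun p => p.1 + 1) := by
  rw [pv_max3]
  generalize max a (max b c) = m
  by_cases h1 : a = m <;> by_cases h2 : b = m <;> by_cases h3 : c = m <;>
    simp [PySem.List.enumerate, beq_iff_eq, h1, h2, h3]

theorem solution_spec : Claim_equal_solution := by
  intro answers _
  unfold Spec_solution solution solution_alt
  dsimp only
  -- A side: one three-counter pass over range(len(answers)) becomes three countP's
  have hR : PySem.List.pyRange 0 (answers.length : Int) 1
      = (PySem.List.enumerate answers 0).map (·.1) := by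
    simpa using (PySem.List.map_fst_enumerate answers 0).symm
  rw [hR, List.foldl_map]
  rw [PySem.List.foldl_congr_mem _ _
      (fun (acc : Int × Int × Int) (q : Int × Int) =>
        ( if PySem.List.pyGetD [1,2,3,4,5] (PySem.Int.mod q.1 (([1,2,3,4,5]:List Int).length : Int)) 0 == q.2 then acc.1 + 1 else acc.1,
          if PySem.List.pyGetD [2,1,2,3,2,4,2,5] (PySem.Int.mod q.1 (([2,1,2,3,2,4,2,5]:List Int).length : Int)) 0 == q.2 then acc.2.1 + 1 else acc.2.1,
          if PySem.List.pyGetD [3,3,1,1,2,2,4,4,5,5] (PySem.Int.mod q.1 (([3,3,1,1,2,2,4,4,5,5]:List Int).length : Int)) 0 == q.2 then acc.2.2 + 1 else acc.2.2)) _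
      (by
        intro acc q hq
        have hget : PySem.List.pyGetD answers q.1 0 = q.2 := by
          have := pv_enum_getD answers [] q (by simpa using hq)
          simpa using this
        simp [hget])]
  rw [PySem.List.foldl_prod_mk
        (fun (s : Int) (q : Int × Int) =>
          if PySem.List.pyGetD [1,2,3,4,5] (PySem.Int.mod q.1 (([1,2,3,4,5]:List Int).length : Int)) 0 == q.2 then s + 1 else s)
        (fun (t : Int × Int) (q : Int × Int) =>
          ( if PySem.List.pyGetD [2,1,2,3,2,4,2,5] (PySem.Int.mod q.1 (([2,1,2,3,2,4,2,5]:List Int).length : Int)) 0 == q.2 then t.1 + 1 else t.1,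
            if PySem.List.pyGetD [3,3,1,1,2,2,4,4,5,5] (PySem.Int.mod q.1 (([3,3,1,1,2,2,4,4,5,5]:List Int).length : Int)) 0 == q.2 then t.2 + 1 else t.2))]
  rw [PySem.List.foldl_prod_mk
        (fun (s : Int) (q : Int × Int) =>
          if PySem.List.pyGetD [2,1,2,3,2,4,2,5] (PySem.Int.mod q.1 (([2,1,2,3,2,4,2,5]:List Int).length : Int)) 0 == q.2 then s + 1 else s)
        (fun (s : Int) (q : Int × Int) =>
          if PySem.List.pyGetD [3,3,1,1,2,2,4,4,5,5] (PySem.Int.mod q.1 (([3,3,1,1,2,2,4,4,5,5]:List Int).length : Int)) 0 == q.2 then s + 1 else s)]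
  rw [PySem.List.foldl_if_add_one, PySem.List.foldl_if_add_one, PySem.List.foldl_if_add_one]
  -- B side: the histogram foldl is Counter of the mapped key list; scores via pv_score_eq
  have hcnt : (PySem.List.enumerate answers 0).foldl
      (fun (d : PySem.Dict (Int × Int) Int) ia =>
        d.insert (PySem.Int.mod ia.1 40, ia.2) (d.getD (PySem.Int.mod ia.1 40, ia.2) 0 + 1))
      PySem.Dict.empty
      = PySem.Dict.counter ((PySem.List.enumerate answers 0).map
          (fun ia => ((PySem.Int.mod ia.1 40, ia.2) : Int × Int))) := by
    rw [← PySem.Dict.foldl_insert_getD_add_one_eq_counter, List.foldl_map]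
  rw [hcnt]
  simp only [List.map_cons, List.map_nil]
  rw [pv_score_eq answers [1,2,3,4,5] (by norm_num) (by norm_num),
      pv_score_eq answers [2,1,2,3,2,4,2,5] (by norm_num) (by norm_num),
      pv_score_eq answers [3,3,1,1,2,2,4,4,5,5] (by norm_num) (by norm_num)]
  simp only [zero_add]
  exact pv_final _ _ _
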